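-- pv_equiv track=rewrite | github.com/CREVOFFICIAL/algorithm | junyeong/programmers/17681.py | solution
-- ===== SOURCE A (Python) =====
-- def solution(n, arr1, arr2):
--     secret_map = []
--
--     for index in range(len(arr1)):
--         number = arr1[index] | arr2[index]
--         item = bin(number)[2:][-n:].zfill(n)
--         map_item = item.replace('1', '#').replace('0', ' ')
--         secret_map.append(map_item)
--
--     return secret_map
-- ===== SOURCE B (Python) =====
-- def solution(n, arr1, arr2):
--     rows = []
--     for a, b in zip(arr1, arr2):
--         digits = bin(a | b)[2:]
--         row = []
--         for k in range(n):
--             j = len(digits) - n + k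
--             c = digits[j] if j >= 0 else '0'
--             row.append('#' if c == '1' else ' ' if c == '0' else c)
--         rows.append(''.join(row))
--     return rows
-- ===== Notes on version B (the rewrite author's own statement) =====
-- stated objective: alternative
-- what changed: B replaces A's slice/zfill/replace string-formatting chain with a single index loop that reads the right-aligned width-n window of the binary digit string ('0' beyond the left edge) and maps each character directly; Pre_ excludes arr2 shorter than arr1 (A raises IndexError) and degenerate widths n <= 0, where A's row is an artefact of Python's [-n:] slicing (the whole untruncated string for n = 0) and B returns empty rows.
-- outside the precondition, e.g. on solution(0, [1], [1]): A returns ['#'], B returns ['']; on solution(-2, [-9], [0]): A returns ['  #'], B returns ['']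
import Mathlib
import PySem

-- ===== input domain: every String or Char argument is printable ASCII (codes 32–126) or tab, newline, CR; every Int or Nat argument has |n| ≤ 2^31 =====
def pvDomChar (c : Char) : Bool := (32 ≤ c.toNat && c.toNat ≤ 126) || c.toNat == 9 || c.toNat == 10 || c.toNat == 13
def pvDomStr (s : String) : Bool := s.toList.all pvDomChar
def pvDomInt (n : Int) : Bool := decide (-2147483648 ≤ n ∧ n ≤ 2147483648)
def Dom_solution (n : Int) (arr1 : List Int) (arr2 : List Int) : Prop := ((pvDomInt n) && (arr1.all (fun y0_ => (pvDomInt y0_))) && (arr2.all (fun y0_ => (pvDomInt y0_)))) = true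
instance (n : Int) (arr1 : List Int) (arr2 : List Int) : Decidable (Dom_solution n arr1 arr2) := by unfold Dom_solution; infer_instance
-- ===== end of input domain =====

-- B replaces A's slice/zfill/replace string-formatting chain by a single index loop that reads
-- the right-aligned width-n window of the binary digit string ('0' beyond the left edge) and
-- maps each character as it goes; same return values on Pre_, no speed claim.

-- ===== PORT A =====
-- the body of A's loop: bin(number)[2:][-n:].zfill(n).replace('1','#').replace('0',' ')
def pvMapItem (n : Int) (number : Int) : String :=
  PySem.Str.replace
    (PySem.Str.replace
      (PySem.Str.zfill
        (PySem.Str.slice (PySem.Str.slice (PySem.Int.pyBin number) (some 2) none) (some (-n)) none) n)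
      "1" "#")
    "0" " "

def solution (n : Int) (arr1 : List Int) (arr2 : List Int) : List String :=
  (PySem.List.pyRange 0 (PySem.List.len arr1)).foldl
    (fun secret_map index =>
      secret_map ++
        [pvMapItem n
          (PySem.Int.bor ((PySem.List.pyGet? arr1 index).getD 0)
            ((PySem.List.pyGet? arr2 index).getD 0))])
    []

-- ===== PORT B =====
-- one row of Source B: for k in range(n): j = len(digits)-n+k; c = digits[j] if j >= 0 else '0';
-- append '#' if c == '1' else ' ' if c == '0' else c
def pvRowB (n : Int) (num : Int) : String :=
  let digits : String := PySem.Str.slice (PySem.Int.pyBin num) (some 2) none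
  String.ofList
    ((PySem.List.pyRange 0 n).foldl
      (fun row k =>
        let j : Int := PySem.Str.len digits - n + k
        let c : Char := if 0 ≤ j then (PySem.Str.pyGet? digits j).getD '0' else '0'
        row ++ [if c = '1' then '#' else if c = '0' then ' ' else c])
      [])

def solution_alt (n : Int) (arr1 : List Int) (arr2 : List Int) : List String :=
  (arr1.zip arr2).foldl
    (fun rows p => rows ++ [pvRowB n (PySem.Int.bor p.1 p.2)]) []

-- ===== PRECONDITION & SPEC =====
-- Pre_ excludes arr2 shorter than arr1, where A raises IndexError, and the degenerate widths
-- n ≤ 0, where A's row is an artefact of Python's [-n:] slicing (the whole untruncated binary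
-- string for n = 0); B returns empty rows there.
def Pre_solution (n : Int) (arr1 : List Int) (arr2 : List Int) : Prop :=
  arr1.length ≤ arr2.length ∧ 0 < n
instance (n : Int) (arr1 : List Int) (arr2 : List Int) : Decidable (Pre_solution n arr1 arr2) := by
  unfold Pre_solution; infer_instance

def pvWitness_solution : Int × List Int × List Int := (5, [9, 20, 28, 18, 11], [30, 1, 21, 17, 28])

def Spec_solution (n : Int) (arr1 : List Int) (arr2 : List Int) (out : List String) : Prop :=
  out = solution_alt n arr1 arr2
instance (n : Int) (arr1 : List Int) (arr2 : List Int) (out : List String) :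
    Decidable (Spec_solution n arr1 arr2 out) := by unfold Spec_solution; infer_instance

-- ===== CLAIM (what is proved, stated in full; the proofs are below) =====
def Claim_equal_solution : Prop := ∀ (n : Int) (arr1 : List Int) (arr2 : List Int),
  Dom_solution n arr1 arr2 → Pre_solution n arr1 arr2 →
    Spec_solution n arr1 arr2 (solution n arr1 arr2)

-- ===== LEMMAS AND PROOFS =====

/-- Binary digit characters of `m`, least-significant first (proof-side helper). -/
def lsbBin (m : Nat) : List Char :=
  if m < 2 then [Nat.digitChar m] else Nat.digitChar (m % 2) :: lsbBin (m / 2)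
decreasing_by exact Nat.div_lt_self (by omega) (by omega)

theorem lsbBin_mem : ∀ (m : Nat) (c : Char), c ∈ lsbBin m → c = '0' ∨ c = '1' := by
  intro m
  induction m using Nat.strong_induction_on with
  | _ m ih =>
    intro c hc
    rw [lsbBin.eq_def] at hc
    split_ifs at hc with hm
    · simp only [List.mem_singleton] at hc
      subst hc
      interval_cases m
      · left; rfl
      · right; rfl
    · rcases List.mem_cons.mp hc with h | h
      · subst h
        rcases Nat.mod_two_eq_zero_or_one m with h2 | h2 <;> rw [h2]
        · left; rfl
        · right; rfl
      · exact ih (m / 2) (Nat.div_lt_self (by omega) (by omega)) c h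

theorem toDigitsCore_two_eq : ∀ (fuel m : Nat) (acc : List Char), m < fuel →
    Nat.toDigitsCore 2 fuel m acc = (lsbBin m).reverse ++ acc := by
  intro fuel
  induction fuel with
  | zero => intro m acc h; omega
  | succ f ihf =>
    intro m acc h
    rw [Nat.toDigitsCore]
    by_cases h2 : m / 2 = 0
    · have hm : m < 2 := by omega
      rw [if_pos h2, lsbBin, if_pos hm]
      simp [Nat.mod_eq_of_lt hm]
    · rw [if_neg h2, ihf (m / 2) ((m % 2).digitChar :: acc) (by omega)]
      rw [show lsbBin m = Nat.digitChar (m % 2) :: lsbBin (m / 2) from by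
        rw [lsbBin.eq_def, if_neg (by omega)]]
      simp

theorem toDigits_two_eq (m : Nat) : Nat.toDigits 2 m = (lsbBin m).reverse := by
  have h := toDigitsCore_two_eq (m + 1) m [] (by omega)
  simpa [Nat.toDigits] using h

/-- The character map performed by `.replace('1','#').replace('0',' ')` (also the per-character
map of Source B's loop body). -/
def pvRmap (x : Char) : Char := if x = '1' then '#' else if x = '0' then ' ' else x

theorem replace_go_single (c d : Char) : ∀ (l : List Char) (fuel : Nat) (acc : List Char),
    l.length ≤ fuel →
    PySem.Chars.replace.go [c] [d] fuel l acc
      = acc.reverse ++ l.map (fun x => if x = c then d else x) := by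
  intro l
  induction l with
  | nil =>
    intro fuel acc _
    cases fuel with
    | zero => rw [PySem.Chars.replace.go]; simp
    | succ f => rw [PySem.Chars.replace.go] <;> simp
  | cons x t ih =>
    intro fuel acc h
    cases fuel with
    | zero => simp at h
    | succ f =>
      rw [PySem.Chars.replace.go]
      by_cases hx : c = x
      · subst hx
        rw [if_pos (by simp [List.isPrefixOf])]
        simp only [List.length_cons, List.length_nil, List.drop_succ_cons, List.drop_zero,
          List.reverse_cons, List.reverse_nil, List.nil_append]
        rw [ih f ([d] ++ acc) (by simpa using h)]
        simp
      · rw [if_neg (by simp [List.isPrefixOf]; exact fun hh => hx hh)]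
        rw [ih f (x :: acc) (by simpa using h)]
        simp [show ¬ (x = c) from fun hh => hx hh.symm]

theorem replace_single (c d : Char) (s : List Char) :
    PySem.Chars.replace s [c] [d] = s.map (fun x => if x = c then d else x) := by
  rw [PySem.Chars.replace]
  simp only [List.isEmpty_cons, Bool.false_eq_true, if_false]
  simpa using replace_go_single c d s s.length [] (le_refl _)

theorem pvComp :
    ((fun x => if x = '0' then ' ' else x) ∘ fun x => if x = '1' then '#' else x) = pvRmap := by
  funext x
  simp only [Function.comp, pvRmap]
  by_cases h1 : x = '1'
  · simp [h1]
  · simp [h1]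

theorem slice_two {α : Type} (x y : α) (l : List α) :
    PySem.List.slice (x :: y :: l) (some 2) none = l := by
  have h2 : PySem.List.clampIdx (x :: y :: l).length 2 = 2 := by
    unfold PySem.List.clampIdx
    simp
  simp only [PySem.List.slice, h2]
  simp [List.take_of_length_le]

theorem pvIdx {α : Type} (l : List α) {a b : Nat} (h : a = b) (hb : b < l.length) :
    l[a]'(h ▸ hb) = l[b]'hb := by subst h; rfl

/-- `cs[-n:]` as a drop, for `n > 0`. -/
theorem sliceNeg (cs : List Char) (n : Int) (hn : 0 < n) :
    PySem.List.slice cs (some (-n)) none = cs.drop (cs.length - n.toNat) := by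
  have ha : PySem.List.clampIdx cs.length (-n) = cs.length - n.toNat := by
    unfold PySem.List.clampIdx
    split_ifs <;> omega
  simp only [PySem.List.slice, ha]
  rw [List.take_of_length_le]
  rw [List.length_drop]

/-- The A-side formatting `cs[-n:].zfill(n)` is exactly the right-aligned width-`n` window of
`cs` with `'0'` beyond the left edge (characters of `cs` are never a sign). -/
theorem windowA (cs : List Char) (n : Int) (hn : 0 < n)
    (hc : ∀ c ∈ cs, c = 'b' ∨ c = '0' ∨ c = '1') :
    PySem.Chars.zfill (PySem.List.slice cs (some (-n)) none) n
      = (PySem.List.pyRange 0 n).map (fun k =>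
          if 0 ≤ (cs.length : Int) - n + k
          then (PySem.List.pyGet? cs ((cs.length : Int) - n + k)).getD '0'
          else '0') := by
  rw [sliceNeg cs n hn]
  set L := cs.length with hL
  set s2 := cs.drop (L - n.toNat) with hs2
  have hlen2 : s2.length = L - (L - n.toNat) := by rw [hs2, List.length_drop]
  have hpadded : PySem.Chars.zfill s2 n
      = List.replicate (n.toNat - s2.length) '0' ++ s2 := by
    by_cases hz : n ≤ (s2.length : Int)
    · rw [PySem.Chars.zfill.eq_def, if_pos hz]
      rw [show n.toNat - s2.length = 0 from by omega]
      simp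
    · rw [PySem.Chars.zfill.eq_def, if_neg hz]
      cases hcase : s2 with
      | nil => simp
      | cons c rest =>
        have hcmem : c ∈ cs :=
          List.mem_of_mem_drop (i := L - n.toNat)
            (by rw [← hs2, hcase]; exact List.mem_cons_self)
        have hns : ¬ (c = '+' ∨ c = '-') := by
          rcases hc c hcmem with h | h | h <;> subst h <;> simp
        simp [hns]
  rw [hpadded]
  apply List.ext_getElem
  · simp [PySem.List.length_pyRange_one, hlen2]
    omega
  · intro i h1 h2
    have hin : i < n.toNat := by
      simp only [List.length_append, List.length_replicate, hlen2] at h1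
      omega
    rw [List.getElem_map, PySem.List.getElem_pyRange_one]
    by_cases hpad : i < n.toNat - s2.length
    · -- left padding: the window is past the left edge of cs
      rw [List.getElem_append_left (by simp; omega), List.getElem_replicate]
      rw [if_neg (by rw [hlen2] at hpad; omega)]
    · -- a character of cs
      rw [List.getElem_append_right (by simp; omega)]
      have hj0 : (0 : Int) ≤ (L : Int) - n + (0 + (i : Int)) := by
        rw [hlen2] at hpad; omega
      rw [if_pos hj0]
      have hjlt : (L : Int) - n + (0 + (i : Int)) < (L : Int) := by
        rw [hlen2] at hpad; omega
      rw [PySem.List.pyGet?_eq_some_getElem _ hj0 hjlt, Option.getD_some]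
      simp only [hs2, List.getElem_drop, List.length_replicate]
      apply pvIdx
      rw [hlen2] at hpad
      have hf : (List.drop (L - n.toNat) cs).length = L - (L - n.toNat) := by
        rw [List.length_drop]
      omega

theorem row_eq (n num : Int) (hn : 0 < n) : pvMapItem n num = pvRowB n num := by
  rw [← String.toList_inj]
  unfold pvMapItem pvRowB
  simp only [PySem.Str.toList_replace, PySem.Str.toList_zfill, PySem.Str.toList_slice,
    PySem.Chars.slice_eq_listSlice, PySem.Int.toList_pyBin, String.toList_ofList,
    PySem.List.foldl_append_singleton_eq_map, List.nil_append]
  rw [show ("1" : String).toList = ['1'] from rfl, show ("#" : String).toList = ['#'] from rfl,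
    show ("0" : String).toList = ['0'] from rfl, show (" " : String).toList = [' '] from rfl]
  rw [replace_single, replace_single, List.map_map, pvComp]
  -- digits as a character list
  have hdig : (PySem.Str.slice (PySem.Int.pyBin num) (some 2) none).toList
      = PySem.List.slice (PySem.Int.toBinChars0b num) (some 2) none := by
    simp [PySem.Str.toList_slice, PySem.Chars.slice_eq_listSlice, PySem.Int.toList_pyBin]
  set cs := PySem.List.slice (PySem.Int.toBinChars0b num) (some 2) none with hcs
  have hmem : ∀ c ∈ cs, c = 'b' ∨ c = '0' ∨ c = '1' := by
    intro c hcmem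
    rw [hcs, PySem.Int.toBinChars0b] at hcmem
    by_cases hneg : num < 0
    · rw [if_pos hneg, toDigits_two_eq, slice_two] at hcmem
      rcases List.mem_cons.mp hcmem with h | h
      · left; exact h
      · exact Or.inr (lsbBin_mem _ c (List.mem_reverse.mp h))
    · rw [if_neg hneg, toDigits_two_eq, slice_two] at hcmem
      exact Or.inr (lsbBin_mem _ c (List.mem_reverse.mp hcmem))
  rw [windowA cs n hn hmem, List.map_map]
  apply List.map_congr_left
  intro k _
  simp only [Function.comp, PySem.Str.len_eq, hdig, PySem.Str.pyGet?, PySem.Chars.pyGet?, pvRmap]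

theorem solution_eq (n : Int) (arr1 arr2 : List Int) (h : arr1.length ≤ arr2.length)
    (hn : 0 < n) : solution n arr1 arr2 = solution_alt n arr1 arr2 := by
  unfold solution solution_alt
  rw [PySem.List.foldl_append_singleton_eq_map, PySem.List.foldl_append_singleton_eq_map]
  simp only [List.nil_append]
  apply List.ext_getElem
  · simp [PySem.List.length_pyRange_one, PySem.List.len_eq, List.length_zip]
    omega
  · intro i hA hB
    have hi1 : i < arr1.length := by
      simp [PySem.List.length_pyRange_one, PySem.List.len_eq] at hA; omega
    have hi2 : i < arr2.length := by omega
    rw [List.getElem_map, List.getElem_map, List.getElem_zip]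
    rw [PySem.List.getElem_pyRange_one]
    simp only [Int.zero_add, PySem.List.pyGet?_natCast]
    rw [List.getElem?_eq_getElem hi1, List.getElem?_eq_getElem hi2]
    simp only [Option.getD_some]
    exact row_eq n _ hn

-- ===== VERDICT (by name: the statement is the Claim_ definition above) =====
theorem solution_spec : Claim_equal_solution := by
  intro n arr1 arr2 _ hpre
  unfold Spec_solution
  exact solution_eq n arr1 arr2 hpre.1 hpre.2
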